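-- pv_equiv track=rewrite | github.com/cmives/Na_selectivity_mechanism_of_TRPM_channels | Analysis_Scripts/trpm_permeation_lowvoltage.py | count_permeations
-- ===== SOURCE A (Python) =====
-- def count_permeations(lst, seq):
--      count = 0
--      len_seq = len(seq)
--      upper_bound = len(lst)-len_seq+1
--      for i in range(upper_bound):
--          if lst[i:i+len_seq] == seq:
--              count += 1
--      return count
-- ===== SOURCE B (Python) =====
-- def count_permeations(lst, seq):
--     # Rabin-Karp: rolling-hash candidate filter; slices are compared only on hash hits.
--     m = len(seq)
--     n = len(lst)
--     if m == 0:
--         return n + 1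
--     if m > n:
--         return 0
--     P = 2305843009213693951
--     B = 1000003
--     pm = 1
--     for _ in range(m):
--         pm = pm * B % P
--     hs = 0
--     for v in seq:
--         hs = (hs * B + v) % P
--     h = 0
--     for v in lst[:m]:
--         h = (h * B + v) % P
--     count = 0
--     for i in range(n - m + 1):
--         if h == hs and lst[i:i+m] == seq:
--             count += 1
--         if i + m < n:
--             h = (h * B + lst[i+m] - lst[i] * pm) % P
--     return count
-- ===== Notes on version B (the rewrite author's own statement) =====
-- stated objective: alternative
-- what changed: Replaced A's compare-a-length-m-slice-at-every-position scan with Rabin-Karp: a rolling polynomial hash over a sliding window filters candidate positions, and the slice comparison runs only on hash hits.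
import Mathlib
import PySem

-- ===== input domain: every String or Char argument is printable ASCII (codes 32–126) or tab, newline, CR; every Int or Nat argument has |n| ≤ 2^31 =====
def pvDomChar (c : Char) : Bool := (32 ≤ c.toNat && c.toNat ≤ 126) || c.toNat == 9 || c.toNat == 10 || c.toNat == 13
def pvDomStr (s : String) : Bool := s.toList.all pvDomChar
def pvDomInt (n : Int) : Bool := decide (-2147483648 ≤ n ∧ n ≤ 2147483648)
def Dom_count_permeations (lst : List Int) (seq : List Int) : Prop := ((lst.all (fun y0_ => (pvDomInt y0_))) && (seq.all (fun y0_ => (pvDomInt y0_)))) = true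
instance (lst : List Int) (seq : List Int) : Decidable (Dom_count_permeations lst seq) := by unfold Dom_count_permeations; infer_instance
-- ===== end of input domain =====

-- B replaces A's compare-a-slice-at-every-position scan by Rabin-Karp rolling hashing
-- (slice comparison only at hash hits): an alternative algorithm, same worst-case cost.

-- ===== PORT A =====
def count_permeations (lst : List Int) (seq : List Int) : Int :=
  let len_seq : Int := seq.length
  let upper_bound : Int := (lst.length : Int) - len_seq + 1
  (PySem.List.pyRange 0 upper_bound 1).foldl
    (fun count i =>
      if PySem.List.slice lst (some i) (some (i + len_seq)) = seq then count + 1 else count) 0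

-- ===== PORT B =====
def count_permeations_alt (lst : List Int) (seq : List Int) : Int :=
  let m : Int := seq.length
  let n : Int := lst.length
  if m = 0 then n + 1
  else if n < m then 0
  else
    let P : Int := 2305843009213693951
    let B : Int := 1000003
    let pm : Int := (PySem.List.pyRange 0 m 1).foldl (fun pm _ => PySem.Int.mod (pm * B) P) 1
    let hs : Int := seq.foldl (fun h v => PySem.Int.mod (h * B + v) P) 0
    let h0 : Int := (PySem.List.slice lst none (some m)).foldl (fun h v => PySem.Int.mod (h * B + v) P) 0
    let r := (PySem.List.pyRange 0 (n - m + 1) 1).foldl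
      (fun (s : Int × Int) i =>
        let c := if s.2 = hs ∧ PySem.List.slice lst (some i) (some (i + m)) = seq then s.1 + 1 else s.1
        let h := if i + m < n then
            PySem.Int.mod (s.2 * B + PySem.List.pyGetD lst (i + m) 0 - PySem.List.pyGetD lst i 0 * pm) P
          else s.2
        (c, h)) (0, h0)
    r.1

-- ===== PRECONDITION & SPEC =====
def Spec_count_permeations (lst : List Int) (seq : List Int) (out : Int) : Prop := out = count_permeations_alt lst seq
instance (lst : List Int) (seq : List Int) (out : Int) : Decidable (Spec_count_permeations lst seq out) := by unfold Spec_count_permeations; infer_instance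

-- ===== CLAIM (what is proved, stated in full; the proofs are below) =====
def Claim_equal_count_permeations : Prop := ∀ (lst : List Int) (seq : List Int), Dom_count_permeations lst seq → Spec_count_permeations lst seq (count_permeations lst seq)

-- ===== LEMMAS AND PROOFS =====

-- polynomial (un-modded) hash value
def pvU (B : Int) (xs : List Int) : Int := xs.foldl (fun a x => a * B + x) 0

lemma pvU_eq (B : Int) (xs : List Int) : pvU B xs = xs.foldl (fun h x => h * B + x) 0 := rfl

lemma pvU_foldl (B : Int) (xs : List Int) : ∀ (a : Int),
    xs.foldl (fun h x => h * B + x) a = a * B ^ xs.length + pvU B xs := by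
  induction xs with
  | nil => intro a; simp [pvU]
  | cons x xs ih =>
    intro a
    rw [pvU_eq]
    simp only [List.foldl_cons, List.length_cons]
    rw [ih (a * B + x), ih (0 * B + x), pvU_eq]
    ring

lemma pvU_append_singleton (B : Int) (xs : List Int) (y : Int) :
    pvU B (xs ++ [y]) = pvU B xs * B + y := by
  simp [pvU, List.foldl_append]

lemma pv_modfold (P B : Int) (hP : 0 < P) (xs : List Int) : ∀ (a : Int),
    xs.foldl (fun h x => PySem.Int.mod (h * B + x) P) (a % P)
      = (xs.foldl (fun h x => h * B + x) a) % P := by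
  induction xs with
  | nil => intro a; simp
  | cons x xs ih =>
    intro a
    simp only [List.foldl_cons]
    rw [PySem.Int.mod_eq_emod_of_pos hP]
    have e : (a % P * B + x) % P = (a * B + x) % P := by
      have hU : Int.ModEq P (a % P) a := Int.emod_emod_of_dvd a dvd_rfl
      exact (hU.mul_right B).add_right x
    rw [e, ih (a * B + x)]

lemma pv_pmfold (P B : Int) (hP : 0 < P) (l : List Int) : ∀ (a : Int),
    l.foldl (fun pm _ => PySem.Int.mod (pm * B) P) (a % P)
      = (a * B ^ l.length) % P := by
  induction l with
  | nil => intro a; simp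
  | cons x l ih =>
    intro a
    simp only [List.foldl_cons, List.length_cons]
    rw [PySem.Int.mod_eq_emod_of_pos hP]
    have e : (a % P * B) % P = (a * B) % P := by
      have hU : Int.ModEq P (a % P) a := Int.emod_emod_of_dvd a dvd_rfl
      exact hU.mul_right B
    rw [e, ih (a * B)]
    ring_nf

lemma pv_roll (B : Int) (lst : List Int) (m i : ℕ) (hm : 1 ≤ m) (h : i + m < lst.length) :
    pvU B ((lst.drop (i+1)).take m)
      = pvU B ((lst.drop i).take m) * B + lst[i + m] - lst[i] * B ^ m := by
  obtain ⟨k, rfl⟩ : ∃ k, m = k + 1 := ⟨m - 1, by omega⟩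
  have hi : i < lst.length := by omega
  have hd : lst.drop i = lst[i] :: lst.drop (i+1) := List.drop_eq_getElem_cons hi
  have ht : (lst.drop (i+1)).take (k+1) = (lst.drop (i+1)).take k ++ [lst[i + (k+1)]] := by
    rw [List.take_add_one]
    have hg : (lst.drop (i+1))[k]? = some lst[i + (k+1)] := by
      rw [List.getElem?_drop]
      rw [List.getElem?_eq_getElem (by omega)]
      congr 1
      congr 1
      omega
    rw [hg]
    rfl
  have hw : (lst.drop i).take (k+1) = lst[i] :: (lst.drop (i+1)).take k := by
    rw [hd, List.take_succ_cons]
  have hlent : ((lst.drop (i+1)).take k).length = k := by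
    rw [List.length_take, List.length_drop]; omega
  have hcons : pvU B ((lst.drop i).take (k+1))
      = lst[i] * B ^ k + pvU B ((lst.drop (i+1)).take k) := by
    rw [hw, pvU_eq, List.foldl_cons, pvU_foldl, hlent, pvU_eq]
    ring
  rw [ht, pvU_append_singleton, hcons]
  ring
lemma pv_pmfold1 (P B : Int) (hP : 1 < P) (l : List Int) :
    l.foldl (fun pm _ => PySem.Int.mod (pm * B) P) 1 = B ^ l.length % P := by
  have h1 : (1 : Int) % P = 1 := Int.emod_eq_of_lt (by omega) hP
  calc l.foldl (fun pm _ => PySem.Int.mod (pm * B) P) 1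
      = l.foldl (fun pm _ => PySem.Int.mod (pm * B) P) ((1 : Int) % P) := by rw [h1]
    _ = (1 * B ^ l.length) % P := pv_pmfold P B (by omega) l 1
    _ = B ^ l.length % P := by ring_nf

lemma pv_modfold0 (P B : Int) (hP : 0 < P) (xs : List Int) :
    xs.foldl (fun h x => PySem.Int.mod (h * B + x) P) 0 = pvU B xs % P := by
  have h1 : (0 : Int) % P = 0 := Int.zero_emod P
  calc xs.foldl (fun h x => PySem.Int.mod (h * B + x) P) 0
      = xs.foldl (fun h x => PySem.Int.mod (h * B + x) P) ((0 : Int) % P) := by rw [h1]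
    _ = (xs.foldl (fun h x => h * B + x) 0) % P := pv_modfold P B hP xs 0
    _ = pvU B xs % P := by rw [pvU_eq]

lemma pv_foldl_const_one (l : List Int) : ∀ c : Int, l.foldl (fun c _ => c + 1) c = c + l.length := by
  induction l with
  | nil => intro c; simp
  | cons x l ih => intro c; simp only [List.foldl_cons, List.length_cons, ih]; push_cast; ring
lemma pv_loop (lst seq : List Int) (P B pm hs : Int) (hP : 0 < P)
    (hm : 1 ≤ seq.length)
    (hpm : pm = B ^ seq.length % P) (hhs : hs = pvU B seq % P) :
    ∀ (k : ℕ) (i c h : Int), 0 ≤ i →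
      ((lst.length : Int) - (seq.length : Int) + 1 - i).toNat = k →
      (i < (lst.length : Int) - (seq.length : Int) + 1 →
        h = pvU B ((lst.drop i.toNat).take seq.length) % P) →
      ((PySem.List.pyRange i ((lst.length : Int) - (seq.length : Int) + 1) 1).foldl
        (fun (s : Int × Int) j =>
          (if s.2 = hs ∧ PySem.List.slice lst (some j) (some (j + (seq.length : Int))) = seq
             then s.1 + 1 else s.1,
           if j + (seq.length : Int) < (lst.length : Int) then
             PySem.Int.mod (s.2 * B + PySem.List.pyGetD lst (j + (seq.length : Int)) 0
               - PySem.List.pyGetD lst j 0 * pm) P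
           else s.2)) (c, h)).1
      = (PySem.List.pyRange i ((lst.length : Int) - (seq.length : Int) + 1) 1).foldl
          (fun c j =>
            if PySem.List.slice lst (some j) (some (j + (seq.length : Int))) = seq
              then c + 1 else c) c := by
  intro k
  induction k with
  | zero =>
    intro i c h hi hk hinv
    rw [PySem.List.pyRange_one_eq_nil (by omega)]
    rfl
  | succ k ih =>
    intro i c h hi hk hinv
    have hilt : i < (lst.length : Int) - (seq.length : Int) + 1 := by omega
    have hinv' := hinv hilt
    rw [PySem.List.pyRange_one_cons (by omega)]
    simp only [List.foldl_cons]
    -- the slice at i is the current window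
    have hsl : PySem.List.slice lst (some i) (some (i + (seq.length : Int)))
        = (lst.drop i.toNat).take seq.length := by
      rw [PySem.List.slice_toNat lst hi (by omega)]
      congr 1
      omega
    -- count components agree
    have hcond : (if h = hs ∧ PySem.List.slice lst (some i) (some (i + (seq.length : Int))) = seq
          then c + 1 else c)
        = (if PySem.List.slice lst (some i) (some (i + (seq.length : Int))) = seq
          then c + 1 else c) := by
      by_cases hseq : PySem.List.slice lst (some i) (some (i + (seq.length : Int))) = seq
      · rw [if_pos hseq, if_pos ⟨by rw [hinv', ← hsl, hseq, hhs], hseq⟩]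
      · rw [if_neg hseq, if_neg (by tauto)]
    rw [hcond]
    apply ih (i + 1) _ _ (by omega) (by omega)
    -- invariant at i+1
    intro hlt
    have hin : i + (seq.length : Int) < (lst.length : Int) := by omega
    rw [if_pos hin]
    have hnat : i.toNat + seq.length < lst.length := by omega
    have hy : PySem.List.pyGetD lst (i + (seq.length : Int)) 0 = lst[i.toNat + seq.length] := by
      rw [PySem.List.pyGetD_eq_getElem lst 0 (by omega) (by omega)]
      congr 1
      omega
    have hx : PySem.List.pyGetD lst i 0 = lst[i.toNat]'(by omega) := by
      rw [PySem.List.pyGetD_eq_getElem lst 0 hi (by omega)]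
    have htn : (i + 1).toNat = i.toNat + 1 := by omega
    rw [htn, pv_roll B lst seq.length i.toNat hm hnat]
    rw [PySem.Int.mod_eq_emod_of_pos hP, hinv', hpm, hy, hx]
    have hU : Int.ModEq P (pvU B ((lst.drop i.toNat).take seq.length) % P)
        (pvU B ((lst.drop i.toNat).take seq.length)) :=
      Int.emod_emod_of_dvd _ dvd_rfl
    have hB : Int.ModEq P (B ^ seq.length % P) (B ^ seq.length) :=
      Int.emod_emod_of_dvd _ dvd_rfl
    exact (((hU.mul_right B).add_right _).sub (hB.mul_left _)).symm.symm

-- ===== VERDICT (by name: the statement is the Claim_ definition above) =====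
theorem count_permeations_spec : Claim_equal_count_permeations := by
  unfold Claim_equal_count_permeations Spec_count_permeations
  intro lst seq _
  simp only [count_permeations, count_permeations_alt]
  by_cases h0 : (seq.length : Int) = 0
  · -- empty pattern: A counts every position, n+1 of them
    rw [if_pos h0]
    have hseq : seq = [] := by
      cases seq with
      | nil => rfl
      | cons a l => exfalso; simp at h0; omega
    subst hseq
    simp only [List.length_nil, Nat.cast_zero, add_zero, sub_zero]
    refine Eq.trans (PySem.List.foldl_congr_mem _ _ (fun (c : Int) _ => c + 1) _ ?_) ?_
    · intro acc x hx
      have hx0 : 0 ≤ x := (PySem.List.mem_pyRange_one.mp hx).1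
      rw [PySem.List.slice_toNat lst hx0 hx0]
      simp
    · rw [pv_foldl_const_one, PySem.List.length_pyRange_one]
      omega
  · rw [if_neg h0]
    by_cases hn : (lst.length : Int) < (seq.length : Int)
    · rw [if_pos hn]
      rw [PySem.List.pyRange_one_eq_nil (by omega)]
      rfl
    · rw [if_neg hn]
      have hP : (0 : Int) < 2305843009213693951 := by norm_num
      have hm : 1 ≤ seq.length := by omega
      have hpm : (PySem.List.pyRange 0 (seq.length : Int) 1).foldl
          (fun pm _ => PySem.Int.mod (pm * 1000003) 2305843009213693951) 1
          = (1000003 : Int) ^ seq.length % 2305843009213693951 := by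
        rw [pv_pmfold1 _ _ (by norm_num), PySem.List.length_pyRange_one]
        simp only [sub_zero, Int.toNat_natCast]
      have hhs : seq.foldl
          (fun h v => PySem.Int.mod (h * 1000003 + v) 2305843009213693951) 0
          = pvU 1000003 seq % 2305843009213693951 := pv_modfold0 _ _ hP seq
      have hh0 : (PySem.List.slice lst none (some (seq.length : Int))).foldl
          (fun h v => PySem.Int.mod (h * 1000003 + v) 2305843009213693951) 0
          = pvU 1000003 ((lst.drop (0 : Int).toNat).take seq.length) % 2305843009213693951 := by
        rw [pv_modfold0 _ _ hP, PySem.List.slice_to lst (by omega)]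
        simp only [Int.toNat_natCast, Int.toNat_zero, List.drop_zero]
      rw [hpm, hhs, hh0]
      exact (pv_loop lst seq 2305843009213693951 1000003 _ _ hP hm rfl rfl
        ((lst.length : Int) - (seq.length : Int) + 1 - 0).toNat 0 0 _ le_rfl rfl
        (fun _ => rfl)).symm
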